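-- pv_equiv track=rewrite | github.com/gahjelle/everybody_codes | python/src/2025_the-song-of-ducks-and-dragons/07_namegraph/ec202507.py | count
-- ===== SOURCE A (Python) =====
-- CACHE: dict[tuple[str, int], int] = {}
--
-- def count(
--     letter: str,
--     rules: dict[str, list[str]],
--     curr_length: int,
--     min_length: int = 7,
--     max_length: int = 11,
-- ) -> int:
--     """Count the number of possible words."""
--     cached = CACHE.get((letter, max_length - curr_length))
--     if cached is not None:
--         return cached
--     if curr_length == max_length:
--         return 1
--     return (curr_length >= min_length) + sum(
--         count(after, rules, curr_length + 1, min_length, max_length)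
--         for after in rules.get(letter, list())
--     )
-- ===== SOURCE B (Python) =====
-- def count(
--     letter,
--     rules,
--     curr_length,
--     min_length=7,
--     max_length=11,
-- ):
--     """Count the number of possible words — forward propagation of path counts per letter,
--     stopping as soon as the frontier dies out."""
--     n = max_length - curr_length
--     if n == 0:
--         return 1
--     total = 0
--     v = {letter: 1}
--     k = 0
--     while v and k < n:
--         if curr_length + k >= min_length:
--             total += sum(v.values())
--         nv = {}
--         for L, c in v.items():
--             for a in rules.get(L, []):
--                 nv[a] = nv.get(a, 0) + c
--         v = nv
--         k += 1
--     if k == n: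
--         total += sum(v.values())
--     return total
-- ===== Notes on version B (the rewrite author's own statement) =====
-- stated objective: faster
-- what changed: Replaces A's uncached exponential top-down recursion (the module-level CACHE is never filled) by forward propagation of a dict of per-letter path counts from depth curr_length towards max_length, stopping early when the frontier dies out.
-- outside the precondition, e.g. on count('a', {}, 12, 7, 11): A returns 1, B returns 0
import Mathlib
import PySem

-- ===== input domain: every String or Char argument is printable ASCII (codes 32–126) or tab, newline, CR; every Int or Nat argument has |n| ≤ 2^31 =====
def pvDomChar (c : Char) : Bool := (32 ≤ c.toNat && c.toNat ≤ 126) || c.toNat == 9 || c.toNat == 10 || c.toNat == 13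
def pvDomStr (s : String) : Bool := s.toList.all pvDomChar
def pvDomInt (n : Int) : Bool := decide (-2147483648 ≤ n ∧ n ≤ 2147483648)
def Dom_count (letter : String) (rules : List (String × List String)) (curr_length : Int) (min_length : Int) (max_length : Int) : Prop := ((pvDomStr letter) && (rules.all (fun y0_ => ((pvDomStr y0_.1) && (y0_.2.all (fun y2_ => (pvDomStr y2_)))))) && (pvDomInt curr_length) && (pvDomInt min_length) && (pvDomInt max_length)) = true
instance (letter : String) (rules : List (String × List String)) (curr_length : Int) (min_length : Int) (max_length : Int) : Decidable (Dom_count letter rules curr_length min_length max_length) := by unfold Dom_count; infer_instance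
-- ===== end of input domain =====

-- B replaces A's uncached exponential top-down recursion by forward propagation of a dict of
-- per-letter path counts from curr_length towards max_length (asymptotically faster).


-- ===== PORT A =====
-- A's recursion descends curr_length+1, …, max_length; fuel = (max_length - curr_length).toNat
-- counts exactly those remaining levels (on Pre_, curr_length ≤ max_length, this is exact).
-- The module-level CACHE of Source A is never written anywhere in the module, so the
-- 'CACHE.get(...)' lookup always misses (returns None); the dead branch is omitted here.
def countA_go (rules : List (String × List String)) (min_length max_length : Int) :
    Nat → String → Int → Int
  | fuel, letter, curr_length =>
    if curr_length = max_length then 1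
    else
      (if curr_length ≥ min_length then 1 else 0) +
        match fuel with
        | 0 => 0   -- unreachable when curr_length ≤ max_length (Pre_): Python would recurse further
        | Nat.succ f =>
          ((List.lookup letter rules).getD []).foldl
            (fun acc after => acc + countA_go rules min_length max_length f after (curr_length + 1)) 0

def count (letter : String) (rules : List (String × List String)) (curr_length : Int) (min_length : Int) (max_length : Int) : Int :=
  countA_go rules min_length max_length (max_length - curr_length).toNat letter curr_length

-- ===== PORT B =====
-- one advance step of B: nv = {}; for L, c in v.items(): for a in rules.get(L, []): nv[a] = nv.get(a, 0) + c
def altAdvance (rules : List (String × List String)) (v : PySem.Dict String Int) : PySem.Dict String Int :=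
  v.items.foldl
    (fun nv Lc => ((List.lookup Lc.1 rules).getD []).foldl
      (fun nv a => nv.insert a (nv.getD a 0 + Lc.2)) nv)
    PySem.Dict.empty

-- B's while loop 'while v and k < n'; it runs at most n iterations (k starts at 0 and
-- increments each round), so fuel = n.toNat makes this exact on every input.
def altLoop (rules : List (String × List String)) (curr_length min_length n : Int) :
    Nat → Int → PySem.Dict String Int → Int → (Int × PySem.Dict String Int × Int)
  | 0, total, v, k => (total, v, k)
  | Nat.succ f, total, v, k =>
    if v.size ≠ 0 ∧ k < n then
      let total := if curr_length + k ≥ min_length then total + v.values.sum else total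
      altLoop rules curr_length min_length n f total (altAdvance rules v) (k + 1)
    else (total, v, k)

def count_alt (letter : String) (rules : List (String × List String)) (curr_length : Int) (min_length : Int) (max_length : Int) : Int :=
  let n := max_length - curr_length
  if n = 0 then 1
  else
    let r := altLoop rules curr_length min_length n n.toNat 0 (PySem.Dict.empty.insert letter 1) 0
    r.1 + (if r.2.2 = n then r.2.1.values.sum else 0)

-- ===== PRECONDITION & SPEC =====
-- Pre_ excludes curr_length > max_length, outside the function's natural domain (curr_length is the
-- recursion depth, always ≤ max_length in the calling program): there A recurses past max_length —
-- diverging with RecursionError whenever the rule graph continues, and otherwise returning a leftover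
-- ≥min_length indicator that counts no word — while B's forward sweep never starts and yields 0.
def Pre_count (letter : String) (rules : List (String × List String)) (curr_length : Int) (min_length : Int) (max_length : Int) : Prop :=
  curr_length ≤ max_length
instance (letter : String) (rules : List (String × List String)) (curr_length : Int) (min_length : Int) (max_length : Int) : Decidable (Pre_count letter rules curr_length min_length max_length) := by unfold Pre_count; infer_instance

def pvWitness_count : String × (List (String × List String)) × Int × Int × Int :=
  ("a", [("a", ["a", "b"]), ("b", [])], 0, 2, 3)

def Spec_count (letter : String) (rules : List (String × List String)) (curr_length : Int) (min_length : Int) (max_length : Int) (out : Int) : Prop := out = count_alt letter rules curr_length min_length max_length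
instance (letter : String) (rules : List (String × List String)) (curr_length : Int) (min_length : Int) (max_length : Int) (out : Int) : Decidable (Spec_count letter rules curr_length min_length max_length out) := by unfold Spec_count; infer_instance

-- ===== CLAIM (what is proved, stated in full; the proofs are below) =====
def Claim_equal_count : Prop := ∀ (letter : String) (rules : List (String × List String)) (curr_length : Int) (min_length : Int) (max_length : Int), Dom_count letter rules curr_length min_length max_length → Pre_count letter rules curr_length min_length max_length → Spec_count letter rules curr_length min_length max_length (count letter rules curr_length min_length max_length)

-- ===== LEMMAS AND PROOFS =====

-- weighted sum of a dict's items under a letter valuation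
def wsum (l : List (String × Int)) (g : String → Int) : Int :=
  (l.map (fun p => p.2 * g p.1)).sum

theorem sum_map_add (l : List (String × Int)) (f g : String × Int → Int) :
    (l.map (fun p => f p + g p)).sum = (l.map f).sum + (l.map g).sum := by
  induction l with
  | nil => simp
  | cons p t ih => simp [ih]; ring

theorem foldl_add_eq (h : String → Int) (l : List String) (c : Int) :
    l.foldl (fun s a => s + h a) c = c + (l.map h).sum := by
  induction l generalizing c with
  | nil => simp
  | cons a t ih => simp [List.foldl_cons, ih, add_assoc]

-- replacing the unique entry with key a by (a, w + c) adds c * g a to the weighted sum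
theorem wsum_replace (l : List (String × Int)) (a : String) (w c : Int) (g : String → Int)
    (hnd : (l.map Prod.fst).Nodup) (hmem : (a, w) ∈ l) :
    wsum (l.map (fun p => if p.1 == a then (a, w + c) else p)) g = wsum l g + c * g a := by
  induction l with
  | nil => simp at hmem
  | cons p t ih =>
    simp only [List.map_cons, List.nodup_cons] at hnd
    rcases List.mem_cons.mp hmem with hp | hp
    · subst hp
      have htid : t.map (fun p => if p.1 == a then (a, w + c) else p) = t := by
        conv_rhs => rw [← List.map_id t]
        apply List.map_congr_left
        intro q hq
        have hqa : q.1 ≠ a := by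
          intro h
          apply hnd.1
          have hmm : q.1 ∈ t.map Prod.fst := List.mem_map_of_mem hq
          rwa [h] at hmm
        simp [hqa]
      simp only [List.map_cons, beq_self_eq_true, if_pos, htid]
      simp [wsum]; ring
    · have hpa : p.1 ≠ a := by
        intro h
        apply hnd.1
        have hmm : (a, w).1 ∈ t.map Prod.fst := List.mem_map_of_mem hp
        rwa [← h] at hmm
      have hrec := ih hnd.2 hp
      simp only [wsum, List.map_cons, List.sum_cons, beq_iff_eq, if_neg hpa] at hrec ⊢
      rw [hrec]; ring

-- inserting (a, getD a 0 + c) adds c * g a to the weighted sum of a nodup-keyed dict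
theorem wsum_insert_add (d : PySem.Dict String Int) (hnd : d.keys.Nodup) (a : String)
    (c : Int) (g : String → Int) :
    wsum (d.insert a (d.getD a 0 + c)).items g = wsum d.items g + c * g a := by
  by_cases hc : d.contains a
  · obtain ⟨w, hw⟩ : ∃ w, d.get? a = some w := by
      cases h : d.get? a with
      | none =>
        exfalso
        have hcc := hc
        rw [PySem.Dict.contains_eq_isSome_get?, h] at hcc
        simp at hcc
      | some w => exact ⟨w, rfl⟩
    have hgetD : d.getD a 0 = w := PySem.Dict.getD_of_get?_eq_some _ _ hw
    have hmem : (a, w) ∈ d.items := PySem.Dict.mem_items_of_get?_eq_some _ hw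
    rw [PySem.Dict.items_insert_of_contains _ _ hc, hgetD]
    exact wsum_replace d.items a w c g (by simpa [PySem.Dict.keys] using hnd) hmem
  · have hcf : d.contains a = false := by simpa using hc
    rw [PySem.Dict.items_insert_of_not_contains _ _ hcf,
      PySem.Dict.getD_of_not_contains _ _ hcf]
    simp [wsum]

-- the inner fold over one successor list
theorem wsum_inner (succ : List String) (nv : PySem.Dict String Int) (hnd : nv.keys.Nodup)
    (c : Int) (g : String → Int) :
    wsum ((succ.foldl (fun nv a => nv.insert a (nv.getD a 0 + c)) nv).items) g
      = wsum nv.items g + c * (succ.map g).sum := by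
  induction succ generalizing nv with
  | nil => simp
  | cons a t ih =>
    rw [List.foldl_cons, ih _ (PySem.Dict.nodup_keys_insert _ _ _ hnd),
      wsum_insert_add nv hnd a c g]
    simp; ring

theorem inner_nodup (succ : List String) (nv : PySem.Dict String Int) (hnd : nv.keys.Nodup) (c : Int) :
    ((succ.foldl (fun nv a => nv.insert a (nv.getD a 0 + c)) nv).keys).Nodup := by
  induction succ generalizing nv with
  | nil => exact hnd
  | cons a t ih => exact ih _ (PySem.Dict.nodup_keys_insert _ _ _ hnd)

theorem advance_fold_nodup (rules : List (String × List String)) (pairs : List (String × Int))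
    (nv : PySem.Dict String Int) (hnd : nv.keys.Nodup) :
    ((pairs.foldl
      (fun nv Lc => ((List.lookup Lc.1 rules).getD []).foldl
        (fun nv a => nv.insert a (nv.getD a 0 + Lc.2)) nv) nv).keys).Nodup := by
  induction pairs generalizing nv with
  | nil => exact hnd
  | cons Lc t ih => exact ih _ (inner_nodup _ _ hnd _)

-- the advance step is bilinear: it turns per-letter weights into per-successor weights
theorem wsum_advance_fold (rules : List (String × List String)) (pairs : List (String × Int))
    (nv : PySem.Dict String Int) (hnd : nv.keys.Nodup) (g : String → Int) :
    wsum ((pairs.foldl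
      (fun nv Lc => ((List.lookup Lc.1 rules).getD []).foldl
        (fun nv a => nv.insert a (nv.getD a 0 + Lc.2)) nv) nv).items) g
      = wsum nv.items g
        + (pairs.map (fun Lc => Lc.2 * (((List.lookup Lc.1 rules).getD []).map g).sum)).sum := by
  induction pairs generalizing nv with
  | nil => simp
  | cons Lc t ih =>
    rw [List.foldl_cons, ih _ (inner_nodup _ _ hnd _), wsum_inner _ _ hnd]
    simp; ring

theorem advance_nodup (rules : List (String × List String)) (v : PySem.Dict String Int) :
    ((altAdvance rules v).keys).Nodup := by
  unfold altAdvance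
  exact advance_fold_nodup rules v.items PySem.Dict.empty (by simp [PySem.Dict.empty, PySem.Dict.keys])

theorem wsum_advance (rules : List (String × List String)) (v : PySem.Dict String Int)
    (hnd : v.keys.Nodup) (g : String → Int) :
    wsum (altAdvance rules v).items g
      = wsum v.items (fun L => (((List.lookup L rules).getD []).map g).sum) := by
  unfold altAdvance
  rw [wsum_advance_fold rules v.items PySem.Dict.empty (by simp [PySem.Dict.empty, PySem.Dict.keys]) g]
  simp [wsum, PySem.Dict.empty]

-- the loop invariant: total plus the weighted sum of remaining A-counts is invariant
theorem loop_inv (rules : List (String × List String)) (curr_length min_length max_length : Int)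
    (f : Nat) (total k : Int) (v : PySem.Dict String Int) (hnd : v.keys.Nodup)
    (hk : k + (f : Int) = max_length - curr_length) :
    (altLoop rules curr_length min_length (max_length - curr_length) f total v k).1
      + (if (altLoop rules curr_length min_length (max_length - curr_length) f total v k).2.2
            = max_length - curr_length
         then (altLoop rules curr_length min_length (max_length - curr_length) f total v k).2.1.values.sum
         else 0)
      = total + wsum v.items (fun L => countA_go rules min_length max_length f L (curr_length + k)) := by
  induction f generalizing total k v with
  | zero =>
    simp only [altLoop]
    have hkn : k = max_length - curr_length := by simpa using hk
    rw [if_pos hkn]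
    have : ∀ L, countA_go rules min_length max_length 0 L (curr_length + k) = 1 := by
      intro L; rw [countA_go, if_pos (by omega)]
    simp only [wsum, this, mul_one]
    simp [PySem.Dict.values]
  | succ f ih =>
    rw [altLoop]
    by_cases hcond : v.size ≠ 0 ∧ k < max_length - curr_length
    · rw [if_pos hcond]
      rw [ih _ _ _ (advance_nodup rules v) (by push_cast at hk ⊢; omega)]
      have hadv : wsum (altAdvance rules v).items
          (fun L => countA_go rules min_length max_length f L (curr_length + (k + 1)))
          = wsum v.items (fun L =>
              (((List.lookup L rules).getD []).map
                (fun a => countA_go rules min_length max_length f a (curr_length + k + 1))).sum) := by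
        rw [wsum_advance rules v hnd]
        unfold wsum
        congr 1
        apply List.map_congr_left
        intro p _
        congr 2
        ring_nf
      rw [hadv]
      have hexp : ∀ L, countA_go rules min_length max_length (f + 1) L (curr_length + k)
          = (if curr_length + k ≥ min_length then 1 else 0)
            + (((List.lookup L rules).getD []).map
                (fun a => countA_go rules min_length max_length f a (curr_length + k + 1))).sum := by
        intro L
        rw [countA_go, if_neg (by omega), foldl_add_eq]
        ring
      simp only [wsum, hexp, mul_add]
      rw [sum_map_add]
      have hvals : (v.items.map (fun p => p.2 * (if curr_length + k ≥ min_length then 1 else 0))).sum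
          = (if curr_length + k ≥ min_length then v.values.sum else 0) := by
        split_ifs with h
        · simp [PySem.Dict.values]
        · simp
      rw [hvals]
      split_ifs with h <;> ring
    · rw [if_neg hcond]
      push_neg at hcond
      by_cases hsz : v.size = 0
      · have hitems : v.items = [] := List.length_eq_zero_iff.mp hsz
        have hkn : ¬ (k = max_length - curr_length) := by push_cast at hk; omega
        simp [hitems, hkn, wsum]
      · have hkn : k = max_length - curr_length := by
          have := hcond hsz; push_cast at hk; omega
        exfalso
        push_cast at hk; omega

-- ===== VERDICT (by name: the statement is the Claim_ definition above) =====
theorem count_spec : Claim_equal_count := by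
  intro letter rules curr_length min_length max_length _hdom hpre
  unfold Spec_count count count_alt
  by_cases heq : max_length - curr_length = 0
  · rw [if_pos heq]
    have : curr_length = max_length := by omega
    subst this
    simp [countA_go]
  · rw [if_neg heq]
    have hle : curr_length ≤ max_length := hpre
    have hfc : ((0 : Int)) + (((max_length - curr_length).toNat : Nat) : Int)
        = max_length - curr_length := by omega
    have hinv := loop_inv rules curr_length min_length max_length
      (max_length - curr_length).toNat 0 0 (PySem.Dict.empty.insert letter 1)
      (PySem.Dict.nodup_keys_insert _ _ _ (by simp [PySem.Dict.empty, PySem.Dict.keys])) hfc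
    rw [hinv]
    have hcf : (PySem.Dict.empty : PySem.Dict String Int).contains letter = false := by
      simp [PySem.Dict.empty, PySem.Dict.contains]
    rw [PySem.Dict.items_insert_of_not_contains _ _ hcf]
    simp [wsum, PySem.Dict.empty]
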